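-- pv_equiv track=rewrite | github.com/ivanbratovic/aoc2023 | day02.py | get_possible_games
-- ===== SOURCE A (Python) =====
-- def get_possible_games(games, max_counts):
--     possible_games = []
--     for i, game in enumerate(games):
--         game_id = i + 1
--         game_possible = True
--         for cube_set in game:
--             for colour, number in cube_set.items():
--                 if number > max_counts[colour]:
--                     game_possible = False
--                     break
--             if not game_possible:
--                 break
--         if game_possible:
--             possible_games.append(game_id)
--     return possible_games
-- ===== SOURCE B (Python) =====
-- def get_possible_games(games, max_counts):
--     possible_games = []
--     for game_id, game in enumerate(games, start=1):
--         maxima = {}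
--         for cube_set in game:
--             for colour, number in cube_set.items():
--                 maxima[colour] = max(maxima.get(colour, number), number)
--         possible = True
--         for colour, biggest in maxima.items():
--             if biggest > max_counts[colour]:
--                 possible = False
--         if possible:
--             possible_games.append(game_id)
--     return possible_games
-- ===== Notes on version B (the rewrite author's own statement) =====
-- stated objective: alternative
-- what changed: Instead of short-circuiting through individual cubes with nested breaks, B aggregates each game into a colour->maximum-count dict and then decides possibility by one comparison pass over that aggregate table.
-- outside the precondition, e.g. on get_possible_games([[{'red': 9, 'blue': 1}]], {'red': 5}): A returns [], B raises KeyError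
import Mathlib
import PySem

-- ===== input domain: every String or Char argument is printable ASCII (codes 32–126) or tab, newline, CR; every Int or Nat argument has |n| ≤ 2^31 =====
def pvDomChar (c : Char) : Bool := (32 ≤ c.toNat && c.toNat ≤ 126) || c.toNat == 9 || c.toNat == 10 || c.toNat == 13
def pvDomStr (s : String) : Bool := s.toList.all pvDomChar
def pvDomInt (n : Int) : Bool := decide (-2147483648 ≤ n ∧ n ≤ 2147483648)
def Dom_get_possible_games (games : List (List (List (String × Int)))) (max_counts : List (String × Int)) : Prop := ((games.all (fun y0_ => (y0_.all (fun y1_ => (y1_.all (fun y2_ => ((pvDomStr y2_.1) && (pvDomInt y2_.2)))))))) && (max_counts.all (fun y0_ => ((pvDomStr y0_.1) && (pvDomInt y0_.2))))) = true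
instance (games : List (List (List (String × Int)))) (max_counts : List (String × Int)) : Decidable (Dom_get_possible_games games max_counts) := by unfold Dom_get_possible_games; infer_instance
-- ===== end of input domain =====

-- B replaces A's nested short-circuit scan by a per-game colour→maximum aggregate dict checked
-- in one comparison pass (objective: alternative decomposition, same cost).

-- ===== PORT A =====
-- max_counts[colour]: first-match association-list lookup; the missing-key case (KeyError) is
-- excluded by Pre_, the default 0 is never the value used inside Pre_.
def pvKeyGet (mc : List (String × Int)) (c : String) : Int :=
  match mc with
  | [] => 0
  | (k, v) :: rest => if k == c then v else pvKeyGet rest c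

-- inner 'for colour, number in cube_set.items(): if number > …: break' (break = stop at first exceed)
def pvSetOkA (mc : List (String × Int)) (s : List (String × Int)) : Bool :=
  match s with
  | [] => true
  | (colour, number) :: rest =>
      if number > pvKeyGet mc colour then false else pvSetOkA mc rest

-- 'for cube_set in game: …; if not game_possible: break'
def pvGameOkA (mc : List (String × Int)) (game : List (List (String × Int))) : Bool :=
  match game with
  | [] => true
  | s :: rest => if pvSetOkA mc s then pvGameOkA mc rest else false

def get_possible_games (games : List (List (List (String × Int)))) (max_counts : List (String × Int)) : List Int :=
  (PySem.List.enumerate games).foldl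
    (fun acc p => if pvGameOkA max_counts p.2 then acc ++ [p.1 + 1] else acc) []

-- ===== PORT B =====
-- maxima[colour] = max(maxima.get(colour, number), number), over all cube sets of the game
def pvMaxDict (game : List (List (String × Int))) : PySem.Dict String Int :=
  game.foldl
    (fun d s => s.foldl (fun d p => d.insert p.1 (max (d.getD p.1 p.2) p.2)) d)
    PySem.Dict.empty

-- 'for colour, biggest in maxima.items(): if biggest > max_counts[colour]: possible = False' (no break)
def pvOkB (mc : List (String × Int)) (d : PySem.Dict String Int) : Bool :=
  d.items.foldl (fun ok p => if p.2 > pvKeyGet mc p.1 then false else ok) true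

def get_possible_games_alt (games : List (List (List (String × Int)))) (max_counts : List (String × Int)) : List Int :=
  (PySem.List.enumerate games 1).foldl
    (fun acc p => if pvOkB max_counts (pvMaxDict p.2) then acc ++ [p.1] else acc) []

-- ===== PRECONDITION & SPEC =====
-- Pre_ excludes inputs where some cube colour is missing from max_counts: there Python A raises
-- KeyError unless an over-limit count breaks its scan first (then A returns), while B aggregates
-- the whole game and always raises KeyError on a missing colour.
def Pre_get_possible_games (games : List (List (List (String × Int)))) (max_counts : List (String × Int)) : Prop :=
  ∀ game ∈ games, ∀ s ∈ game, ∀ p ∈ s, p.1 ∈ max_counts.map Prod.fst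
instance (games : List (List (List (String × Int)))) (max_counts : List (String × Int)) : Decidable (Pre_get_possible_games games max_counts) := by unfold Pre_get_possible_games; infer_instance

def pvWitness_get_possible_games : (List (List (List (String × Int)))) × (List (String × Int)) :=
  ([[[("red", 1), ("blue", 2)], [("red", 4)]], [[("blue", 9)]]], [("red", 5), ("blue", 4)])

def Spec_get_possible_games (games : List (List (List (String × Int)))) (max_counts : List (String × Int)) (out : List Int) : Prop := out = get_possible_games_alt games max_counts
instance (games : List (List (List (String × Int)))) (max_counts : List (String × Int)) (out : List Int) : Decidable (Spec_get_possible_games games max_counts out) := by unfold Spec_get_possible_games; infer_instance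

-- ===== CLAIM (what is proved, stated in full; the proofs are below) =====
def Claim_equal_get_possible_games : Prop := ∀ (games : List (List (List (String × Int)))) (max_counts : List (String × Int)), Dom_get_possible_games games max_counts → Pre_get_possible_games games max_counts → Spec_get_possible_games games max_counts (get_possible_games games max_counts)

-- ===== LEMMAS AND PROOFS =====

-- A's short-circuiting cube-set scan computes "all cubes within limit"
theorem pvSetOkA_eq_all (mc : List (String × Int)) (s : List (String × Int)) :
    pvSetOkA mc s = s.all (fun p => decide (p.2 ≤ pvKeyGet mc p.1)) := by
  induction s with
  | nil => rfl
  | cons p rest ih =>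
      obtain ⟨c, n⟩ := p
      by_cases h : n > pvKeyGet mc c
      · simp [pvSetOkA, h, show ¬(n ≤ pvKeyGet mc c) from by omega]
      · simp [pvSetOkA, h, show n ≤ pvKeyGet mc c from by omega, ih]

-- A's per-game scan with its two breaks computes "all cube sets pass"
theorem pvGameOkA_eq_all (mc : List (String × Int)) (g : List (List (String × Int))) :
    pvGameOkA mc g = g.all (fun s => s.all (fun p => decide (p.2 ≤ pvKeyGet mc p.1))) := by
  induction g with
  | nil => rfl
  | cons s rest ih =>
      cases h : pvSetOkA mc s
      · rw [pvSetOkA_eq_all] at h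
        simp [pvGameOkA, pvSetOkA_eq_all, h]
      · rw [pvSetOkA_eq_all] at h
        simp [pvGameOkA, pvSetOkA_eq_all, h, ih]

-- B's no-break flag loop computes "all aggregated maxima within limit"
theorem foldl_flag_eq_all (mc : List (String × Int)) (l : List (String × Int)) (b : Bool) :
    l.foldl (fun ok p => if p.2 > pvKeyGet mc p.1 then false else ok) b
      = (b && l.all (fun p => decide (p.2 ≤ pvKeyGet mc p.1))) := by
  induction l generalizing b with
  | nil => simp
  | cons p rest ih =>
      obtain ⟨c, n⟩ := p
      rw [List.foldl_cons]
      dsimp only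
      by_cases h : n > pvKeyGet mc c
      · rw [if_pos h, ih]
        simp [show ¬(n ≤ pvKeyGet mc c) from by omega]
      · rw [if_neg h, ih]
        simp [show n ≤ pvKeyGet mc c from by omega]

-- one insert step of the aggregate preserves "all entries within limit ∧ the new cube within limit"
theorem all_items_insert_max (mc : List (String × Int)) (d : PySem.Dict String Int)
    (hnd : d.keys.Nodup) (c : String) (n : Int) :
    (∀ p ∈ (d.insert c (max (d.getD c n) n)).items, p.2 ≤ pvKeyGet mc p.1)
      ↔ ((∀ p ∈ d.items, p.2 ≤ pvKeyGet mc p.1) ∧ n ≤ pvKeyGet mc c) := by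
  constructor
  · intro h
    have hm : max (d.getD c n) n ≤ pvKeyGet mc c :=
      h _ (PySem.Dict.mem_items_insert_self d c _)
    refine ⟨?_, le_trans (le_max_right _ _) hm⟩
    intro p hp
    by_cases hc : p.1 = c
    · obtain ⟨k, v⟩ := p
      simp only at hc; subst hc
      have hv : d.getD k n = v := PySem.Dict.getD_of_mem_items d hp hnd n
      exact le_trans (hv ▸ le_max_left _ n) hm
    · exact h p ((PySem.Dict.mem_items_insert d c _ p).2 (Or.inr ⟨hp, hc⟩))
  · rintro ⟨hall, hn⟩
    intro p hp
    rcases (PySem.Dict.mem_items_insert d c _ p).1 hp with h | ⟨hmem, _⟩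
    · subst h
      simp only
      by_cases h1 : d.getD c n ≤ n
      · simpa [max_eq_right h1] using hn
      · have hc : d.contains c = true := by
          by_contra hc
          have : d.getD c n = n :=
            PySem.Dict.getD_of_not_contains d n (by simpa using hc)
          omega
        have hsome : (d.get? c).isSome := by
          rw [← PySem.Dict.contains_eq_isSome_get?]; exact hc
        obtain ⟨v, hv⟩ := Option.isSome_iff_exists.1 hsome
        have hvm : (c, v) ∈ d.items := PySem.Dict.mem_items_of_get?_eq_some d hv
        have hgd : d.getD c n = v := PySem.Dict.getD_of_get?_eq_some d n hv
        exact max_le (hgd ▸ hall _ hvm) hn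
    · exact hall p hmem

-- folding the aggregate over a cube list: entries within limit ⟺ previous entries and all cubes within limit
theorem all_items_maxfold (mc : List (String × Int)) (l : List (String × Int))
    (d : PySem.Dict String Int) (hnd : d.keys.Nodup) :
    (∀ p ∈ (l.foldl (fun d p => d.insert p.1 (max (d.getD p.1 p.2) p.2)) d).items, p.2 ≤ pvKeyGet mc p.1)
      ↔ ((∀ p ∈ d.items, p.2 ≤ pvKeyGet mc p.1) ∧ ∀ p ∈ l, p.2 ≤ pvKeyGet mc p.1) := by
  induction l generalizing d with
  | nil => simp
  | cons q rest ih =>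
      rw [List.foldl_cons,
        ih _ (PySem.Dict.nodup_keys_insert d q.1 _ hnd),
        all_items_insert_max mc d hnd q.1 q.2]
      constructor
      · rintro ⟨⟨h1, h2⟩, h3⟩
        refine ⟨h1, ?_⟩
        intro p hp
        rcases List.mem_cons.1 hp with h | h
        · subst h; exact h2
        · exact h3 p h
      · rintro ⟨h1, h2⟩
        exact ⟨⟨h1, h2 q List.mem_cons_self⟩, fun p hp => h2 p (List.mem_cons_of_mem _ hp)⟩

-- per game: B's aggregate check equals A's direct check
theorem game_eq (mc : List (String × Int)) (g : List (List (String × Int))) :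
    pvOkB mc (pvMaxDict g) = pvGameOkA mc g := by
  unfold pvOkB pvMaxDict
  rw [foldl_flag_eq_all, Bool.true_and, ← List.foldl_flatten, pvGameOkA_eq_all,
    Bool.eq_iff_iff]
  simp only [List.all_eq_true, decide_eq_true_iff]
  rw [all_items_maxfold mc g.flatten PySem.Dict.empty PySem.Dict.nodup_keys_empty]
  have hemp : (PySem.Dict.empty : PySem.Dict String Int).items = [] := rfl
  rw [hemp]
  constructor
  · rintro ⟨-, h⟩ s hs p hp
    exact h p (List.mem_flatten.2 ⟨s, hs, hp⟩)
  · intro h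
    refine ⟨by simp, ?_⟩
    intro p hp
    obtain ⟨s, hs, hps⟩ := List.mem_flatten.1 hp
    exact h s hs p hps

-- the two enumeration folds agree (A numbers from 0 and adds 1; B numbers from start+1)
theorem fold_shift (mc : List (String × Int)) (games : List (List (List (String × Int))))
    (s : Int) (acc : List Int) :
    (PySem.List.enumerate games s).foldl
        (fun acc p => if pvGameOkA mc p.2 then acc ++ [p.1 + 1] else acc) acc
      = (PySem.List.enumerate games (s + 1)).foldl
        (fun acc p => if pvOkB mc (pvMaxDict p.2) then acc ++ [p.1] else acc) acc := by
  induction games generalizing s acc with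
  | nil =>
      rw [PySem.List.enumerate_nil, PySem.List.enumerate_nil]
      rfl
  | cons g gs ih =>
      rw [PySem.List.enumerate_cons, PySem.List.enumerate_cons, List.foldl_cons,
        List.foldl_cons]
      dsimp only
      rw [game_eq mc g]
      exact ih (s + 1) _

-- ===== VERDICT (by name: the statement is the Claim_ definition above) =====
theorem get_possible_games_spec : Claim_equal_get_possible_games := by
  intro games mc _ _
  unfold Spec_get_possible_games get_possible_games get_possible_games_alt
  have h := fold_shift mc games 0 []
  norm_num at h
  exact h
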